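-- pv_equiv track=rewrite | github.com/chanzuckerberg/czid-workflows | short-read-mngs/idseq-dag/idseq_dag/util/lineage.py | _fill_missing_calls
-- ===== SOURCE A (Python) =====
-- from typing import List, Sequence, Iterator
--
-- INVALID_CALL_BASE_ID = -(10**8)
--
-- def _fill_missing_calls(cleaned_lineage: Sequence[str]) -> List[str]:
--     """Replace missing calls with virtual taxids as shown in
--     fill_missing_calls_tests. Replaces the negative call IDs with a
--     calculated negative value that embeds the next higher positive call in it
--     to indicate (1) the call is non-specific (negative/artificial) and (2)
--     there is a positive specific call above it on the taxonomy tree.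
--
--     Ex: with species_id, genus_id, family_id
--     (55, -200, 1534) => (55, -200001534, 1534)
--     (-100, 5888, -300) => (-100005888, 5888, -300)
--     """
--     result = list(cleaned_lineage)
--     tax_level = len(cleaned_lineage)
--     closest_real_hit_just_above_me = -1
--
--     for tax_level in range(len(cleaned_lineage), 0, -1):
--         me = int(cleaned_lineage[tax_level - 1])
--         if me >= 0:
--             closest_real_hit_just_above_me = me
--         elif closest_real_hit_just_above_me >= 0 and _blank(me):
--             result[tax_level - 1] = str(tax_level * INVALID_CALL_BASE_ID - closest_real_hit_just_above_me)
--     return result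
--
-- def _blank(taxid_int: int):
--     return 0 > taxid_int > INVALID_CALL_BASE_ID
-- ===== SOURCE B (Python) =====
-- from typing import List, Sequence, Optional
--
-- INVALID_CALL_BASE_ID = -(10**8)
--
-- def _first_positive(tail: Sequence[str]) -> Optional[int]:
--     for t in tail:
--         v = int(t)
--         if v >= 0:
--             return v
--     return None
--
-- def _fill_missing_calls(cleaned_lineage: Sequence[str]) -> List[str]:
--     result = []
--     for j, s in enumerate(cleaned_lineage, start=1):
--         me = int(s)
--         out = s
--         if INVALID_CALL_BASE_ID < me < 0:
--             p = _first_positive(cleaned_lineage[j:])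
--             if p is not None:
--                 out = str(j * INVALID_CALL_BASE_ID - p)
--         result.append(out)
--     return result
-- ===== Notes on version B (the rewrite author's own statement) =====
-- stated objective: alternative
-- what changed: Replaces the single backward pass carrying a 'closest real hit above' accumulator and in-place list mutation with a forward per-element rebuild that, for each blank entry, searches the suffix for the first non-negative call.
import Mathlib
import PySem

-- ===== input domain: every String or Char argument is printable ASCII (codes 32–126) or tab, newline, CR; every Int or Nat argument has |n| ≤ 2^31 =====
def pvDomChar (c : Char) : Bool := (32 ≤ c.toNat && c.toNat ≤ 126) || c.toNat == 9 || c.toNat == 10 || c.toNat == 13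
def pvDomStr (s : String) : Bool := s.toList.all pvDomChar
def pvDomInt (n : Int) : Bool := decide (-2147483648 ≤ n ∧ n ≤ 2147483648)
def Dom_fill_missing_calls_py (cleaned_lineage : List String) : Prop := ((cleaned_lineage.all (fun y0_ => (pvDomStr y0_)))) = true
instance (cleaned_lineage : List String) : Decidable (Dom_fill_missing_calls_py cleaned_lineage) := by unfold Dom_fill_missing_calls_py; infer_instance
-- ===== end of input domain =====

-- B rebuilds the list front-to-back, finding for each blank entry the first non-negative
-- call in the suffix, instead of A's backward pass with a running accumulator; objective: alternative.

def pvBase : Int := -(10 ^ 8)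

-- int(s); under Pre_ every element parses, so the default is never used
def pvToInt (s : String) : Int := (PySem.Int.ofStr? s).getD 0

def pvBlank (m : Int) : Bool := decide (0 > m ∧ m > pvBase)

-- ===== PORT A =====
def fill_missing_calls_py (cleaned_lineage : List String) : List String :=
  (((PySem.List.pyRange cleaned_lineage.length 0 (-1)).foldl
    (fun (st : List String × Int) (tax_level : Int) =>
      let me := pvToInt ((PySem.List.pyGet? cleaned_lineage (tax_level - 1)).getD "")
      if me ≥ 0 then (st.1, me)
      else if st.2 ≥ 0 ∧ pvBlank me = true then
        (st.1.set (tax_level - 1).toNat (PySem.Int.toStr (tax_level * pvBase - st.2)), st.2)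
      else st)
    (cleaned_lineage, -1))).1

-- ===== PORT B =====
def pvFirstPositive : List String → Option Int
  | [] => none
  | t :: rest => let v := pvToInt t; if v ≥ 0 then some v else pvFirstPositive rest

def pvAltGo : Int → List String → List String
  | _, [] => []
  | j, s :: rest =>
    let me := pvToInt s
    (if pvBlank me = true then
       match pvFirstPositive rest with
       | some p => PySem.Int.toStr (j * pvBase - p)
       | none => s
     else s) :: pvAltGo (j + 1) rest

def fill_missing_calls_py_alt (cleaned_lineage : List String) : List String :=
  pvAltGo 1 cleaned_lineage

-- ===== PRECONDITION & SPEC =====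
-- Pre_: every element is an int-parsable string (otherwise Python's int() raises ValueError in both A and B)
def Pre_fill_missing_calls_py (cleaned_lineage : List String) : Prop :=
  ∀ s ∈ cleaned_lineage, (PySem.Int.ofStr? s).isSome = true
instance (cleaned_lineage : List String) : Decidable (Pre_fill_missing_calls_py cleaned_lineage) := by
  unfold Pre_fill_missing_calls_py; infer_instance
def pvWitness_fill_missing_calls_py : List String := ["55", "-200", "1534"]

def Spec_fill_missing_calls_py (cleaned_lineage : List String) (out : List String) : Prop :=
  out = fill_missing_calls_py_alt cleaned_lineage
instance (cleaned_lineage : List String) (out : List String) : Decidable (Spec_fill_missing_calls_py cleaned_lineage out) := by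
  unfold Spec_fill_missing_calls_py; infer_instance

-- ===== CLAIM =====
def Claim_equal_fill_missing_calls_py : Prop :=
  ∀ (cleaned_lineage : List String), Dom_fill_missing_calls_py cleaned_lineage →
    Pre_fill_missing_calls_py cleaned_lineage →
    Spec_fill_missing_calls_py cleaned_lineage (fill_missing_calls_py cleaned_lineage)

-- ===== LEMMAS AND PROOFS =====

-- generalized back-recursion spec: head of l sits at 1-based position j, c0 is the
-- closest real hit strictly above the whole of l; returns (result, closest from l or c0)
def pvGen (j : Int) (l : List String) (c0 : Int) : List String × Int :=
  match l with
  | [] => ([], c0)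
  | s :: rest =>
    let rc := pvGen (j + 1) rest c0
    let me := pvToInt s
    if me ≥ 0 then (s :: rc.1, me)
    else if rc.2 ≥ 0 ∧ pvBlank me = true then
      (PySem.Int.toStr (j * pvBase - rc.2) :: rc.1, rc.2)
    else (s :: rc.1, rc.2)

lemma pvGen_snd (j : Int) (l : List String) (c0 : Int) :
    (pvGen j l c0).2 = (pvFirstPositive l).getD c0 := by
  induction l generalizing j with
  | nil => rfl
  | cons s rest ih =>
    simp only [pvGen, pvFirstPositive]
    by_cases h : pvToInt s ≥ 0
    · simp [h]
    · simp only [if_neg h]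
      split_ifs <;> simp [ih (j + 1)]

lemma pvFirstPositive_nonneg {l : List String} {p : Int}
    (h : pvFirstPositive l = some p) : 0 ≤ p := by
  induction l with
  | nil => simp [pvFirstPositive] at h
  | cons s rest ih =>
    simp only [pvFirstPositive] at h
    by_cases hv : pvToInt s ≥ 0
    · simp [hv] at h; omega
    · simp only [if_neg hv] at h; exact ih h

lemma pvGen_fst_eq_altGo (j : Int) (l : List String) :
    (pvGen j l (-1)).1 = pvAltGo j l := by
  induction l generalizing j with
  | nil => rfl
  | cons s rest ih =>
    simp only [pvGen, pvAltGo]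
    by_cases h : pvToInt s ≥ 0
    · have hb : pvBlank (pvToInt s) = false := by
        simp [pvBlank]; intro h1; omega
      simp [h, hb, ih]
    · have hsnd := pvGen_snd (j + 1) rest (-1)
      cases hb : pvBlank (pvToInt s) with
      | false => simp [h, ih]
      | true =>
        cases hp : pvFirstPositive rest with
        | none =>
          have hc : (pvGen (j + 1) rest (-1)).2 = -1 := by rw [hsnd, hp]; rfl
          simp [h, hc, ih]
        | some p =>
          have hpos := pvFirstPositive_nonneg hp
          have hc : (pvGen (j + 1) rest (-1)).2 = p := by rw [hsnd, hp]; rfl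
          simp [h, hc, ih, hpos]

-- snoc step for pvGen
lemma pvGen_snoc (j : Int) (l : List String) (s : String) (c0 : Int) :
    pvGen j (l ++ [s]) c0 =
      (let me := pvToInt s
       if me ≥ 0 then ((pvGen j l me).1 ++ [s], (pvGen j l me).2)
       else if c0 ≥ 0 ∧ pvBlank me = true then
         ((pvGen j l c0).1 ++ [PySem.Int.toStr ((j + l.length) * pvBase - c0)], (pvGen j l c0).2)
       else ((pvGen j l c0).1 ++ [s], (pvGen j l c0).2)) := by
  induction l generalizing j with
  | nil =>
    simp only [List.nil_append, pvGen, List.length_nil]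
    split_ifs <;> simp
  | cons t rest ih =>
    simp only [List.cons_append, pvGen, ih (j + 1)]
    have hlen : (j + 1) + (rest.length : Int) = j + ((t :: rest).length : Int) := by
      simp [List.length_cons]; ring
    by_cases hs : pvToInt s ≥ 0
    · rw [if_pos hs, if_pos hs]
      (try split_ifs) <;> simp
    · rw [if_neg hs, if_neg hs]
      by_cases hc : c0 ≥ 0 ∧ pvBlank (pvToInt s) = true
      · rw [if_pos hc, if_pos hc]
        rw [hlen]
        (try split_ifs) <;> simp
      · rw [if_neg hc, if_neg hc]
        (try split_ifs) <;> simp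

lemma set_middle (l v : List String) (s x : String) :
    (l ++ s :: v).set l.length x = l ++ x :: v := by
  induction l with
  | nil => rfl
  | cons a t ih => simp [ih]

-- the A-side fold over range(i,0,-1), state = (take i xs ++ v, c0), computes pvGen on the prefix
lemma pvFold_eq_gen (xs : List String) (i : Nat) (hi : i ≤ xs.length) (v : List String) (c0 : Int) :
    ((PySem.List.pyRange (i : Int) 0 (-1)).foldl
      (fun (st : List String × Int) (tax_level : Int) =>
        let me := pvToInt ((PySem.List.pyGet? xs (tax_level - 1)).getD "")
        if me ≥ 0 then (st.1, me)
        else if st.2 ≥ 0 ∧ pvBlank me = true then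
          (st.1.set (tax_level - 1).toNat (PySem.Int.toStr (tax_level * pvBase - st.2)), st.2)
        else st)
      (xs.take i ++ v, c0))
    = ((pvGen 1 (xs.take i) c0).1 ++ v, (pvGen 1 (xs.take i) c0).2) := by
  induction i generalizing v c0 with
  | zero =>
    rw [PySem.List.pyRange_neg_one_eq_nil (by norm_num)]
    simp [pvGen]
  | succ n ih =>
    have hn : n < xs.length := by omega
    rw [PySem.List.pyRange_neg_one_cons (by exact_mod_cast Nat.cast_pos.mpr (Nat.succ_pos n))]
    have hcast : ((n + 1 : Nat) : Int) - 1 = (n : Int) := by push_cast; ring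
    have hget : (PySem.List.pyGet? xs (((n + 1 : Nat) : Int) - 1)).getD "" = xs[n] := by
      rw [hcast, PySem.List.pyGet?_natCast]
      simp [List.getElem?_eq_getElem hn]
    have htake : xs.take (n + 1) = xs.take n ++ [xs[n]] := by
      rw [List.take_add_one, List.getElem?_eq_getElem hn]; rfl
    have hlen : (xs.take n).length = n := List.length_take_of_le (by omega)
    simp only [List.foldl_cons, hget]
    by_cases hme : pvToInt xs[n] ≥ 0
    · rw [if_pos hme]
      have h1 : xs.take (n+1) ++ v = xs.take n ++ ([xs[n]] ++ v) := by
        rw [htake, List.append_assoc]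
      rw [hcast, h1, ih (le_of_lt hn) ([xs[n]] ++ v) (pvToInt xs[n]), htake, pvGen_snoc]
      simp only [if_pos hme]
      simp
    · rw [if_neg hme]
      by_cases hc : c0 ≥ 0 ∧ pvBlank (pvToInt xs[n]) = true
      · rw [if_pos hc]
        have hidx : (((n + 1 : Nat) : Int) - 1).toNat = n := by omega
        have hset : (xs.take (n+1) ++ v).set ((((n+1:Nat)):Int) - 1).toNat
            (PySem.Int.toStr (((n+1:Nat) : Int) * pvBase - c0))
            = xs.take n ++ ([PySem.Int.toStr (((n+1:Nat) : Int) * pvBase - c0)] ++ v) := by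
          rw [hidx, htake]
          have hs2 := set_middle (xs.take n) v xs[n] (PySem.Int.toStr (((n+1:Nat) : Int) * pvBase - c0))
          rw [hlen] at hs2
          rw [List.append_assoc, List.singleton_append, hs2, List.singleton_append]
        rw [hset, hcast, ih (le_of_lt hn) _ c0, htake, pvGen_snoc]
        simp only [if_neg hme, if_pos hc]
        have h3 : ((1 : Int) + (xs.take n).length) * pvBase - c0
            = ((n + 1 : Nat) : Int) * pvBase - c0 := by
          rw [hlen]; push_cast; ring
        rw [h3, List.append_assoc]
      · rw [if_neg hc]
        have h1 : xs.take (n+1) ++ v = xs.take n ++ ([xs[n]] ++ v) := by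
          rw [htake, List.append_assoc]
        rw [hcast, h1, ih (le_of_lt hn) _ c0, htake, pvGen_snoc]
        simp only [if_neg hme, if_neg hc]
        simp

-- ===== VERDICT =====
theorem fill_missing_calls_py_spec : Claim_equal_fill_missing_calls_py := by
  intro xs _ _
  unfold Spec_fill_missing_calls_py fill_missing_calls_py fill_missing_calls_py_alt
  have h := pvFold_eq_gen xs xs.length le_rfl [] (-1)
  simp only [List.take_length, List.append_nil] at h
  rw [show ((xs.length : Int)) = ((xs.length : Nat) : Int) from rfl] at *
  rw [h, pvGen_fst_eq_altGo]
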